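-- pv_equiv track=rewrite | github.com/gunnihinn/advent-2018 | py/day12.py | parse
-- ===== SOURCE A (Python) =====
-- def parse(lines):
--     plants = 0
--     for (i, p) in enumerate(lines[0][15:].strip()):
--         if p == '#':
--             plants |= 1 << i
--
--     rules = []
--     for line in lines[2:]:
--         line = line.strip()
--         if line[-1] == '#':
--             rules.append(rule_to_number(line[0:5]))
--
--     return (rules, plants)
--
-- def rule_to_number(rule):
--     b = 0
--     for i in range(0, len(rule)):
--         if rule[i] == '#':
--             b |= 1 << i
--
--     return b
-- ===== SOURCE B (Python) =====
-- def parse(lines):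
--     def mask(s):
--         bits = ''.join('1' if c == '#' else '0' for c in reversed(s))
--         return int(bits, 2) if bits else 0
--
--     plants = mask(lines[0][15:].strip())
--     rules = [mask(line.strip()[:5]) for line in lines[2:] if line.strip()[-1] == '#']
--     return (rules, plants)
-- ===== Notes on version B (the rewrite author's own statement) =====
-- stated objective: idiomatic
-- what changed: Replaces both per-bit OR-accumulation loops (b |= 1 << i over enumerate/range) with whole-string binary parses: translate '#'/'.' to '1'/'0', reverse so index 0 is the least-significant bit, and int(bits, 2); rule filtering becomes a single list comprehension.
import Mathlib
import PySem

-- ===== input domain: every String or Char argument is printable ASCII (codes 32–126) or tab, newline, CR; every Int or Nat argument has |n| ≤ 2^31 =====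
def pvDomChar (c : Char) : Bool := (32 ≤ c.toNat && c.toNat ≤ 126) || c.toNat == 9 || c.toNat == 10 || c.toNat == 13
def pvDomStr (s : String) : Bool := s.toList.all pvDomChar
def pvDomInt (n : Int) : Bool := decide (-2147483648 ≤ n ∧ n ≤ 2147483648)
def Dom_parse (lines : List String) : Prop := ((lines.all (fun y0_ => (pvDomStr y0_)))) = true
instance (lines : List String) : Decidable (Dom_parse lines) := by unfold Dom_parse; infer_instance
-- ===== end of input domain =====

-- B rebuilds the two per-bit OR-accumulation loops as whole-string binary parses (translate '#'/'.' to '1'/'0',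
-- reverse, int(_, 2)); same return value, idiomatic rather than faster. No argument is mutated.

-- ===== PORT A =====
-- rule_to_number: b |= 1 << i over range(len(rule)); Python's 1 << i is (1:Int) <<< i (i ≥ 0 here)
def ruleToNumber (rule : List Char) : Int :=
  (PySem.List.pyRange 0 rule.length 1).foldl
    (fun b i => if PySem.List.pyGet? rule i = some '#' then PySem.Int.bor b ((1:Int) <<< i) else b) 0

def parse (lines : List String) : List Int × Int :=
  match PySem.List.pyGet? lines 0 with
  | none => ([], 0)  -- unreachable under Pre_parse: Python raises IndexError on lines[0]
  | some l0 =>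
    let state := PySem.Chars.strip (PySem.Chars.slice l0.toList (some 15) none)
    let plants := (PySem.List.enumerate state 0).foldl
      (fun b p => if p.2 = '#' then PySem.Int.bor b ((1:Int) <<< p.1) else b) 0
    let rules := (PySem.List.slice lines (some 2) none).foldl
      (fun rs line =>
        let t := PySem.Chars.strip line.toList
        if PySem.List.pyGet? t (-1) = some '#'
        then rs ++ [ruleToNumber (PySem.List.slice t (some 0) (some 5))]
        else rs) []
    (rules, plants)

-- ===== PORT B =====
-- int(bits, 2): binary parse, most-significant digit first (the 'if bits else 0' guard of Source B)
def pvBin (ds : List Char) : Int :=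
  ds.foldl (fun acc c => 2 * acc + (if c = '1' then 1 else 0)) 0

def pvMask (s : List Char) : Int :=
  if s = [] then 0 else pvBin ((s.map (fun c => if c = '#' then '1' else '0')).reverse)

def parse_alt (lines : List String) : List Int × Int :=
  match PySem.List.pyGet? lines 0 with
  | none => ([], 0)  -- unreachable under Pre_parse
  | some l0 =>
    let plants := pvMask (PySem.Chars.strip (PySem.Chars.slice l0.toList (some 15) none))
    let rules := (PySem.List.slice lines (some 2) none).filterMap
      (fun line =>
        let t := PySem.Chars.strip line.toList
        if PySem.List.pyGet? t (-1) = some '#'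
        then some (pvMask (PySem.List.slice t none (some 5)))
        else none)
    (rules, plants)

-- ===== PRECONDITION & SPEC =====
-- Pre_ excludes exactly the inputs where Python A raises: an empty lines list (lines[0] → IndexError)
-- and any line after the second that strips to the empty string (line[-1] → IndexError).
def Pre_parse (lines : List String) : Prop :=
  lines ≠ [] ∧ ∀ l ∈ lines.drop 2, PySem.Chars.strip l.toList ≠ []
instance (lines : List String) : Decidable (Pre_parse lines) := by unfold Pre_parse; infer_instance

def pvWitness_parse : List String := ["initial state: #..#.#", "", "..#.. => #", "#.#.# => ."]

def Spec_parse (lines : List String) (out : List Int × Int) : Prop := out = parse_alt lines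
instance (lines : List String) (out : List Int × Int) : Decidable (Spec_parse lines out) := by unfold Spec_parse; infer_instance

-- ===== CLAIM (what is proved, stated in full; the proofs are below) =====
def Claim_equal_parse : Prop := ∀ (lines : List String), Dom_parse lines → Pre_parse lines → Spec_parse lines (parse lines)

-- ===== LEMMAS AND PROOFS =====

-- the common value both programs compute for a '#'-string: bit i set iff character i is '#'
def natval (cs : List Char) : Nat :=
  cs.foldr (fun c acc => 2 * acc + (if c = '#' then 1 else 0)) 0

theorem lor_pow_of_lt (m k : Nat) (h : m < 2^k) : m ||| (2^k) = m + 2^k := by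
  apply Nat.eq_of_testBit_eq
  intro i
  rw [Nat.testBit_lor, Nat.add_comm m (2^k)]
  rcases lt_trichotomy i k with hi | rfl | hi
  · rw [Nat.testBit_two_pow_add_gt hi, Nat.testBit_two_pow_of_ne (Nat.ne_of_gt hi)]
    simp
  · rw [Nat.testBit_two_pow_add_eq, Nat.testBit_two_pow_self, Nat.testBit_eq_false_of_lt h]
    simp
  · have h1 : m < 2 ^ i := lt_of_lt_of_le h (Nat.pow_le_pow_right (by norm_num) (Nat.le_of_lt hi))
    have h2 : 2^k + m < 2 ^ i := by
      have h3 : 2^k + m < 2^(k+1) := by have := Nat.pow_succ 2 k; omega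
      exact lt_of_lt_of_le h3 (Nat.pow_le_pow_right (by norm_num) hi)
    rw [Nat.testBit_eq_false_of_lt h2, Nat.testBit_eq_false_of_lt h1,
      Nat.testBit_two_pow_of_ne (Nat.ne_of_gt hi).symm]
    rfl

theorem shift_one_nat (k : Nat) : (1:Int) <<< ((k : Nat) : Int) = ((2 ^ k : Nat) : Int) :=
  Int.one_shiftLeft k

-- A's plants/rule loop over enumerate computes natval
theorem enum_fold_eq (cs : List Char) : ∀ (k m : Nat), m < 2 ^ k →
    (PySem.List.enumerate cs (k : Int)).foldl
      (fun b p => if p.2 = '#' then PySem.Int.bor b ((1:Int) <<< p.1) else b) ((m : Nat) : Int)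
    = ((m + 2 ^ k * natval cs : Nat) : Int) := by
  induction cs with
  | nil => intro k m h; simp [PySem.List.enumerate, natval]
  | cons c cs ih =>
    intro k m h
    rw [PySem.List.enumerate_cons, List.foldl_cons]
    have hk1 : ((k : Int) + 1) = ((k + 1 : Nat) : Int) := by push_cast; ring
    have hstep : (if ((k : Int), c).2 = '#' then PySem.Int.bor ((m : Nat) : Int) ((1:Int) <<< ((k : Int), c).1) else ((m : Nat) : Int))
        = (((m + 2 ^ k * (if c = '#' then 1 else 0)) : Nat) : Int) := by
      by_cases hc : c = '#'
      · simp only [hc, if_true]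
        rw [shift_one_nat, PySem.Int.bor_natCast, lor_pow_of_lt m k h]
        simp
      · simp [hc]
    have hm' : m + 2 ^ k * (if c = '#' then 1 else 0) < 2 ^ (k + 1) := by
      have := Nat.pow_succ 2 k
      split_ifs <;> omega
    rw [hstep, hk1, ih (k + 1) _ hm']
    congr 1
    simp only [natval, List.foldr_cons]
    have hnv : natval cs = cs.foldr (fun c acc => 2 * acc + (if c = '#' then 1 else 0)) 0 := rfl
    rw [← hnv, Nat.pow_succ]
    by_cases hc : c = '#' <;> simp [hc] <;> ring

theorem plants_fold_eq (cs : List Char) :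
    (PySem.List.enumerate cs 0).foldl
      (fun b p => if p.2 = '#' then PySem.Int.bor b ((1:Int) <<< p.1) else b) 0
    = ((natval cs : Nat) : Int) := by
  have := enum_fold_eq cs 0 0 (by norm_num)
  simpa using this

-- B's binary parse of the reversed translated string computes natval too
theorem pvBin_rev_eq (cs : List Char) :
    pvBin ((cs.map (fun c => if c = '#' then '1' else '0')).reverse) = ((natval cs : Nat) : Int) := by
  induction cs with
  | nil => simp [pvBin, natval]
  | cons c cs ih =>
    simp only [List.map_cons, List.reverse_cons]
    unfold pvBin at *
    rw [List.foldl_append, ih]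
    simp only [List.foldl_cons, List.foldl_nil, natval, List.foldr_cons]
    have : natval cs = cs.foldr (fun c acc => 2 * acc + (if c = '#' then 1 else 0)) 0 := rfl
    rw [← this]
    by_cases hc : c = '#' <;> simp [hc]

theorem pvMask_eq (cs : List Char) : pvMask cs = ((natval cs : Nat) : Int) := by
  by_cases h : cs = []
  · simp [pvMask, h, natval]
  · rw [pvMask, if_neg h, pvBin_rev_eq]

-- A's rule_to_number (range + pyGet?) equals the enumerate fold, hence natval
theorem ruleToNumber_eq (cs : List Char) : ruleToNumber cs = ((natval cs : Nat) : Int) := by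
  rw [← plants_fold_eq]
  rw [PySem.List.enumerate_eq_map_pyRange cs '.', List.foldl_map]
  unfold ruleToNumber
  rw [show PySem.List.len cs = (cs.length : Int) from by simp [PySem.List.len]]
  apply PySem.List.foldl_congr_mem
  intro acc j hj
  have hjr := (PySem.List.mem_pyRange_one).1 hj
  have h0 : 0 ≤ j := hjr.1
  have hlt : j.toNat < cs.length := by omega
  have hjc : j = ((j.toNat : Nat) : Int) := by omega
  rw [hjc, PySem.List.pyGet?_natCast, PySem.List.pyGetD_natCast]
  simp [List.getElem?_eq_getElem hlt]

theorem rules_fold_eq (L : List String) : ∀ (acc : List Int),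
    L.foldl (fun rs line =>
        if PySem.List.pyGet? (PySem.Chars.strip line.toList) (-1) = some '#'
        then rs ++ [ruleToNumber (PySem.List.slice (PySem.Chars.strip line.toList) (some 0) (some 5))]
        else rs) acc
    = acc ++ L.filterMap (fun line =>
        if PySem.List.pyGet? (PySem.Chars.strip line.toList) (-1) = some '#'
        then some (pvMask (PySem.List.slice (PySem.Chars.strip line.toList) none (some 5)))
        else none) := by
  induction L with
  | nil => intro acc; simp
  | cons line L ih =>
    intro acc
    rw [List.foldl_cons, List.filterMap_cons]
    by_cases h : PySem.List.pyGet? (PySem.Chars.strip line.toList) (-1) = some '#'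
    · rw [if_pos h, if_pos h, ih]
      rw [ruleToNumber_eq, pvMask_eq]
      simp [PySem.List.slice_zero_start]
    · rw [if_neg h, if_neg h, ih]

-- ===== VERDICT (by name: the statement is the Claim_ definition above) =====
theorem parse_spec : Claim_equal_parse := by
  intro lines _ _
  unfold Spec_parse parse parse_alt
  cases hget : PySem.List.pyGet? lines 0 with
  | none => rfl
  | some l0 =>
    simp only
    refine Prod.ext ?_ ?_
    · rw [rules_fold_eq, List.nil_append]
    · exact (plants_fold_eq _).trans (pvMask_eq _).symm
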